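-- pv_equiv track=rewrite | github.com/posl/comment_recommendation | script/split_gen/4_time/en/250_D/8.py | solve
-- ===== SOURCE A (Python) =====
-- def solve(n):
--     p = 1
--     q = 2
--     ans = 0
--     while p < n:
--         while p * q**3 < n:
--             q += 1
--         ans += q - 2
--         p += 1
--         q = p + 1
--     return ans
-- ===== SOURCE B (Python) =====
-- def icbrt_ceil(m):
--     # least q >= 1 with q**3 >= m (binary search)
--     lo, hi = 1, m
--     while lo < hi:
--         mid = lo + (hi - lo) // 2
--         if mid ** 3 >= m:
--             hi = mid
--         else:
--             lo = mid + 1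
--     return lo
--
--
-- def solve(n):
--     ans = 0
--     p = 1
--     while p * (p + 1) ** 3 < n:
--         m = -((-n) // p)          # ceil(n / p)
--         ans += icbrt_ceil(m) - 2
--         p += 1
--     if n > p:
--         # for every remaining p < n the threshold q is p + 1, contributing p - 1
--         ans += (n - 1) * (n - 2) // 2 - (p - 1) * (p - 2) // 2
--     return ans
-- ===== Notes on version B (the rewrite author's own statement) =====
-- stated objective: faster
-- what changed: A advances q by unit steps for every p below n; B binary-searches the integer ceiling cube root of ceil(n/p) for the few small p whose inner loop actually moves, and replaces the whole remaining tail, where the threshold stays at the value q is re-seeded with, by a closed-form arithmetic-series sum.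
import Mathlib
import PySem

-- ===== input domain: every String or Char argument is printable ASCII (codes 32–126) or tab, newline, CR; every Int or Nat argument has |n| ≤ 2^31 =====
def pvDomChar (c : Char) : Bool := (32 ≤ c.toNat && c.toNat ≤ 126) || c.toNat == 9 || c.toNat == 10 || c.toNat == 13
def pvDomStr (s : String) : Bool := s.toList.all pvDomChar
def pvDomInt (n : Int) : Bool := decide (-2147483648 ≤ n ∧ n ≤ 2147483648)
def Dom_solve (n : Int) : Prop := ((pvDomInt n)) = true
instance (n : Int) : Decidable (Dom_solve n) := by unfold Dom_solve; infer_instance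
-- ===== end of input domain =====

-- B replaces A's per-unit increments by a binary-search cube root per small p plus a
-- closed-form arithmetic-series formula for the tail where the threshold never moves (objective: faster).
-- The Nat 'fuel' arguments below only make the loops total; each is a proved-sufficient bound.

-- ===== PORT A =====
-- inner 'while p * q**3 < n: q += 1' (fuel (n - q).toNat suffices: each step needs q < n)
def pvInnerAGo : Nat → Int → Int → Int → Int
  | 0, _, _, q => q
  | k + 1, n, p, q => if p * q ^ 3 < n then pvInnerAGo k n p (q + 1) else q

def pvInnerA (n p q : Int) : Int := pvInnerAGo (n - q).toNat n p q

-- outer 'while p < n' with state (p, q, ans); A re-seeds q = p + 1 after each step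
def pvOuterAGo : Nat → Int → Int → Int → Int → Int
  | 0, _, _, _, ans => ans
  | k + 1, n, p, q, ans =>
    if p < n then pvOuterAGo k n (p + 1) ((p + 1) + 1) (ans + (pvInnerA n p q - 2)) else ans

def solve (n : Int) : Int := pvOuterAGo (n - 1).toNat n 1 2 0

-- ===== PORT B =====
-- binary-search loop of icbrt_ceil: 'while lo < hi: mid = lo + (hi-lo)//2 …' (interval shrinks each step)
def pvIcbrtGo : Nat → Int → Int → Int → Int
  | 0, _, lo, _ => lo
  | k + 1, m, lo, hi =>
    if lo < hi then
      let mid := lo + PySem.Int.floordiv (hi - lo) 2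
      if m ≤ mid ^ 3 then pvIcbrtGo k m lo mid else pvIcbrtGo k m (mid + 1) hi
    else lo

-- icbrt_ceil(m): least q ≥ 1 with q**3 ≥ m
def pvIcbrtCeil (m : Int) : Int := pvIcbrtGo (m - 1).toNat m 1 m

-- head loop 'while p * (p+1)**3 < n', returns (p, ans)
def pvHeadBGo : Nat → Int → Int → Int → Int × Int
  | 0, _, p, ans => (p, ans)
  | k + 1, n, p, ans =>
    if p * (p + 1) ^ 3 < n then
      pvHeadBGo k n (p + 1) (ans + (pvIcbrtCeil (-(PySem.Int.floordiv (-n) p)) - 2))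
    else (p, ans)

def solve_alt (n : Int) : Int :=
  let r := pvHeadBGo (n - 1).toNat n 1 0
  if r.1 < n then
    r.2 + (PySem.Int.floordiv ((n - 1) * (n - 2)) 2 - PySem.Int.floordiv ((r.1 - 1) * (r.1 - 2)) 2)
  else r.2

-- ===== PRECONDITION & SPEC =====
def Spec_solve (n : Int) (out : Int) : Prop := out = solve_alt n
instance (n : Int) (out : Int) : Decidable (Spec_solve n out) := by unfold Spec_solve; infer_instance

-- ===== CLAIM (what is proved, stated in full; the proofs are below) =====
def Claim_equal_solve : Prop := ∀ (n : Int), Dom_solve n → Spec_solve n (solve n)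

-- ===== LEMMAS AND PROOFS =====

-- q ≤ p * q^3 for 1 ≤ p, 1 ≤ q
theorem pvSelfLe (p q : Int) (hp : 1 ≤ p) (hq : 1 ≤ q) : q ≤ p * q ^ 3 := by
  have h1 : q ≤ q ^ 3 := by nlinarith [sq_nonneg q, sq_nonneg (q - 1)]
  have h2 : q ^ 3 ≤ p * q ^ 3 := by nlinarith [pow_pos (show (0:Int) < q by omega) 3]
  omega

-- A's inner loop returns the least q' ≥ q with n ≤ p * q'^3 (given enough fuel)
theorem pvInnerAGo_spec (k : Nat) :
    ∀ n p q : Int, 1 ≤ p → 1 ≤ q → (n - q).toNat ≤ k →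
    q ≤ pvInnerAGo k n p q ∧ n ≤ p * (pvInnerAGo k n p q) ^ 3 ∧
      ∀ x, q ≤ x → x < pvInnerAGo k n p q → p * x ^ 3 < n := by
  induction k with
  | zero =>
    intro n p q hp hq hk
    have := pvSelfLe p q hp hq
    exact ⟨le_refl _, by simp [pvInnerAGo]; omega, fun x hx1 hx2 => by simp [pvInnerAGo] at hx2; omega⟩
  | succ k ih =>
    intro n p q hp hq hk
    by_cases h : p * q ^ 3 < n
    · have hqn : q < n := by have := pvSelfLe p q hp hq; omega
      have hrec := ih n p (q + 1) hp (by omega) (by omega)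
      simp only [pvInnerAGo, h, if_pos]
      refine ⟨by omega, hrec.2.1, fun x hx1 hx2 => ?_⟩
      rcases eq_or_lt_of_le hx1 with rfl | hlt
      · exact h
      · exact hrec.2.2 x (by omega) hx2
    · simp only [pvInnerAGo, h, if_neg, not_false_iff]
      exact ⟨le_refl _, by omega, fun x hx1 hx2 => by omega⟩

-- wrapper form used below
theorem pvInnerA_spec (n p q : Int) (hp : 1 ≤ p) (hq : 1 ≤ q) :
    q ≤ pvInnerA n p q ∧ n ≤ p * (pvInnerA n p q) ^ 3 ∧
      ∀ x, q ≤ x → x < pvInnerA n p q → p * x ^ 3 < n :=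
  pvInnerAGo_spec (n - q).toNat n p q hp hq (le_refl _)

-- when the loop guard already fails, the inner loop returns q at any fuel
theorem pvInnerAGo_stop (k : Nat) (n p q : Int) (h : ¬ p * q ^ 3 < n) :
    pvInnerAGo k n p q = q := by
  cases k <;> simp [pvInnerAGo, h]

-- the binary search returns the least r with m ≤ r^3, within [lo, hi] (given fuel ≥ hi - lo)
theorem pvIcbrtGo_spec (k : Nat) :
    ∀ m lo hi : Int, lo ≤ hi → (hi - lo).toNat ≤ k → m ≤ hi ^ 3 → (∀ x, x < lo → x ^ 3 < m) →
    lo ≤ pvIcbrtGo k m lo hi ∧ pvIcbrtGo k m lo hi ≤ hi ∧ m ≤ (pvIcbrtGo k m lo hi) ^ 3 ∧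
      ∀ x, x < pvIcbrtGo k m lo hi → x ^ 3 < m := by
  induction k with
  | zero =>
    intro m lo hi hlh hk hhi hlo
    have heq : lo = hi := by omega
    subst heq
    exact ⟨le_refl _, le_refl _, by simpa [pvIcbrtGo] using hhi, by simpa [pvIcbrtGo] using hlo⟩
  | succ k ih =>
    intro m lo hi hlh hk hhi hlo
    by_cases h : lo < hi
    · simp only [pvIcbrtGo, h, if_pos]
      have hmid : lo ≤ lo + PySem.Int.floordiv (hi - lo) 2 ∧ lo + PySem.Int.floordiv (hi - lo) 2 < hi := by
        rw [PySem.Int.floordiv_eq_ediv_of_pos (by omega : (0:Int) < 2)]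
        omega
      set mid := lo + PySem.Int.floordiv (hi - lo) 2 with hmiddef
      by_cases hm : m ≤ mid ^ 3
      · simp only [hm, if_pos]
        have := ih m lo mid (by omega) (by omega) hm hlo
        exact ⟨this.1, by omega, this.2.2⟩
      · simp only [hm, if_neg, not_false_iff]
        have hlo' : ∀ x, x < mid + 1 → x ^ 3 < m := by
          intro x hx
          rcases lt_or_ge x lo with h1 | h1
          · exact hlo x h1
          · have : x ^ 3 ≤ mid ^ 3 := (Odd.strictMono_pow (R := ℤ) (by decide : Odd 3)).monotone (by omega)
            omega
        have := ih m (mid + 1) hi (by omega) (by omega) hhi hlo'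
        exact ⟨by omega, this.2.1, this.2.2⟩
    · have heq : lo = hi := by omega
      subst heq
      simp only [pvIcbrtGo, h, if_neg, not_false_iff]
      exact ⟨le_refl _, le_refl _, hhi, hlo⟩

-- ceiling bracket: for 0 < p,  -((-n) // p) ≤ y ↔ n ≤ p * y
theorem pvCeilLe (n p y : Int) (hp : 0 < p) :
    (-(PySem.Int.floordiv (-n) p) ≤ y) ↔ n ≤ p * y := by
  have key := PySem.Int.le_floordiv_iff_mul_le (a := -n) (b := p) (q := -y) hp
  constructor <;> intro h
  · have := key.mp (by omega)
    nlinarith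
  · have := key.mpr (by nlinarith)
    omega

-- in the head region A's inner threshold equals B's cube-root value
theorem pvHeadStep (n p : Int) (hp : 1 ≤ p) (h : p * (p + 1) ^ 3 < n) :
    pvInnerA n p (p + 1) = pvIcbrtCeil (-(PySem.Int.floordiv (-n) p)) := by
  set m := -(PySem.Int.floordiv (-n) p) with hm
  have hbr : ∀ y, (m ≤ y ↔ n ≤ p * y) := fun y => pvCeilLe n p y (by omega)
  have hm9 : 9 ≤ m := by
    by_contra hc
    have h8 : m ≤ (p + 1) ^ 3 := by nlinarith [sq_nonneg (p + 1), sq_nonneg p]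
    have := (hbr ((p + 1) ^ 3)).mp h8
    omega
  have hmc : m ≤ m ^ 3 := by
    nlinarith [mul_nonneg (mul_nonneg (by omega : (0:ℤ) ≤ m) (by omega : (0:ℤ) ≤ m - 1)) (by omega : (0:ℤ) ≤ m + 1)]
  obtain ⟨hr1, hr2, hr3, hr4⟩ :=
    pvIcbrtGo_spec (m - 1).toNat m 1 m (by omega) (by omega) hmc (by
      intro x hx
      have hx3 : x ^ 3 ≤ 0 := Odd.pow_nonpos (by decide) (by omega)
      omega)
  obtain ⟨ha1, ha2, ha3⟩ := pvInnerA_spec n p (p + 1) hp (by omega)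
  set r := pvIcbrtGo (m - 1).toNat m 1 m with hrdef
  set a := pvInnerA n p (p + 1) with hadef
  have hrn : n ≤ p * r ^ 3 := (hbr (r ^ 3)).mp hr3
  have hrp : p + 1 < r := by
    by_contra hc
    have : r ^ 3 ≤ (p + 1) ^ 3 := (Odd.strictMono_pow (R := ℤ) (by decide : Odd 3)).monotone (by omega)
    nlinarith
  have h1 : a ≤ r := by
    by_contra hc
    have := ha3 r (by omega) (by omega)
    omega
  have h2 : r ≤ a := by
    by_contra hc
    have hcube := hr4 a (by omega)
    have : ¬ n ≤ p * a ^ 3 := fun hn => by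
      have := (hbr (a ^ 3)).mpr hn
      omega
    omega
  show a = pvIcbrtGo (m - 1).toNat m 1 m
  omega

-- tail: once n ≤ p * (p+1)^3, every later threshold is p + 1; the sum closes to a formula
theorem pvTail (n : Int) (k : Nat) :
    ∀ p ans : Int, 1 ≤ p → (n - p).toNat ≤ k → n ≤ p * (p + 1) ^ 3 →
    pvOuterAGo k n p ((p + 1) + 1 - 1) ans =
      if p < n then
        ans + (PySem.Int.floordiv ((n - 1) * (n - 2)) 2 -
               PySem.Int.floordiv ((p - 1) * (p - 2)) 2)
      else ans := by
  induction k with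
  | zero =>
    intro p ans hp hk hth
    have : ¬ p < n := by omega
    simp [pvOuterAGo, this]
  | succ k ih =>
    intro p ans hp hk hth
    by_cases hpn : p < n
    · simp only [pvOuterAGo, hpn, if_pos]
      have hin : pvInnerA n p ((p + 1) + 1 - 1) = p + 1 := by
        have harg : (p + 1) + 1 - 1 = p + 1 := by ring
        rw [harg]
        exact pvInnerAGo_stop _ n p (p + 1) (by omega)
      rw [hin]
      have hth' : n ≤ (p + 1) * ((p + 1) + 1) ^ 3 := by nlinarith [sq_nonneg p, sq_nonneg (p + 1)]
      have hstep := ih (p + 1) (ans + (p + 1 - 2)) (by omega) (by omega) hth'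
      have harg2 : ((p + 1) + 1) + 1 - 1 = (p + 1) + 1 := by ring
      rw [harg2] at hstep
      rw [hstep]
      rw [PySem.Int.floordiv_eq_ediv_of_pos (by omega : (0:Int) < 2),
          PySem.Int.floordiv_eq_ediv_of_pos (by omega : (0:Int) < 2),
          PySem.Int.floordiv_eq_ediv_of_pos (by omega : (0:Int) < 2)]
      have hE : ((n - 1) * (n - 2)) % 2 = 0 := by
        have h1 : Even ((n - 2) * ((n - 2) + 1)) := Int.even_mul_succ_self (n - 2)
        have h2 : (n - 1) * (n - 2) = (n - 2) * ((n - 2) + 1) := by ring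
        obtain ⟨c, hc⟩ := h1
        rw [h2]
        omega
      have hF : (p * (p - 1)) % 2 = 0 := by
        have h1 : Even ((p - 1) * ((p - 1) + 1)) := Int.even_mul_succ_self (p - 1)
        have h2 : p * (p - 1) = (p - 1) * ((p - 1) + 1) := by ring
        obtain ⟨c, hc⟩ := h1
        rw [h2]
        omega
      have hrel1 : ((p + 1) - 1) * ((p + 1) - 2) = p * (p - 1) := by ring
      have hrel2 : (p - 1) * (p - 2) = p * (p - 1) - 2 * (p - 1) := by ring
      rw [hrel1, hrel2]
      by_cases hpn1 : p + 1 < n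
      · simp only [hpn1, if_pos]
        omega
      · simp only [hpn1, if_false]
        have hnp : n = p + 1 := by omega
        subst hnp
        omega
    · simp [pvOuterAGo, hpn]

-- main invariant: from any head state (p, ans), with the same fuel, the two loops agree
theorem pvMain (n : Int) (k : Nat) :
    ∀ p ans : Int, 1 ≤ p → (n - p).toNat ≤ k →
    pvOuterAGo k n p ((p + 1) + 1 - 1) ans =
      (let r := pvHeadBGo k n p ans
       if r.1 < n then
         r.2 + (PySem.Int.floordiv ((n - 1) * (n - 2)) 2 -
                PySem.Int.floordiv ((r.1 - 1) * (r.1 - 2)) 2)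
       else r.2) := by
  induction k with
  | zero =>
    intro p ans hp hk
    have : ¬ p < n := by omega
    simp [pvOuterAGo, pvHeadBGo, this]
  | succ k ih =>
    intro p ans hp hk
    by_cases h : p * (p + 1) ^ 3 < n
    · have hp1 : 0 < (p + 1) ^ 3 := by positivity
      have hpn : p < n := by nlinarith
      simp only [pvOuterAGo, pvHeadBGo, hpn, h, if_pos]
      have harg : (p + 1) + 1 - 1 = p + 1 := by ring
      rw [harg, pvHeadStep n p hp h]
      have := ih (p + 1) (ans + (pvIcbrtCeil (-(PySem.Int.floordiv (-n) p)) - 2)) (by omega) (by omega)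
      have harg2 : ((p + 1) + 1) + 1 - 1 = (p + 1) + 1 := by ring
      rw [harg2] at this
      simpa using this
    · simp only [pvHeadBGo, h, if_neg, not_false_iff]
      simpa using pvTail n (k + 1) p ans hp (by omega) (by omega)
  -- note: pvOuterAGo's q argument is written '(p + 1) + 1 - 1' so both fuel cases share one statement

-- ===== VERDICT (by name: the statement is the Claim_ definition above) =====
theorem solve_spec : Claim_equal_solve := by
  intro n _
  unfold Spec_solve solve solve_alt
  have h := pvMain n (n - 1).toNat 1 0 (by omega) (by omega)
  have harg : ((1:Int) + 1) + 1 - 1 = 2 := by ring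
  rw [harg] at h
  simpa using h
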